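-- pv_equiv track=rewrite | github.com/saarku/knowledge-graph-explorer | python/word_embeddings.py | merge_phrases
-- ===== SOURCE A (Python) =====
-- def merge_phrases(text, phrase_stopwords):
--     """Convert a (segmented) line of AutoPhrase output for learning an embedding model.
--
--     Args:
--       text: (string) the segmented line.
--       phrase_stopwords: (list) a list of stopwords that cannot appear in phrases
--     Returns:
--       The processed text.
--     """
--     phrase_flag = False
--     new_line = ''
--     phrase = ''
--     for word in text.rstrip('\n').split():
--         if phrase_flag:
--             phrase += '_' + word.replace('</phrase>', '')
--             if '</phrase>' in word:
--                 phrase_flag = False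
--                 if not check_phrasal_stopwords(phrase, phrase_stopwords):
--                     new_line += phrase + ' '
--
--         elif '<phrase>' in word and '</phrase>' in word:
--             if not check_phrasal_stopwords(word, phrase_stopwords):
--                 new_line += word.replace('<phrase>', '').replace('</phrase>', '') + ' '
--
--         elif '<phrase>' in word:
--             phrase = word.replace('<phrase>', '')
--             phrase_flag = True
--
--         #else:
--         #    new_line += word + ' '
--     return new_line
--
-- def check_phrasal_stopwords(phrase, stopwords_list):
--     """Check if a phrase contains a stopword from the list.
--
--     Args:
--       phrase: (string) a text (phrase).
--       stopwords_list: (list) a list of stopwords that cannot appear in phrases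
--     Returns:
--       True if the phrase contains a stopword
--     """
--     flag = False
--     for w in stopwords_list:
--         if w in phrase:
--             return True
--     return flag
-- ===== SOURCE B (Python) =====
-- def merge_phrases(text, phrase_stopwords):
--     """Merge phrase-tagged tokens, dropping phrases containing any stopword substring.
--
--     Staged approach: precompute per-word tag flags and a suffix jump table
--     next_close (first word index >= k carrying the closing tag), then walk the
--     word list by index, emitting each phrase from a single slice-and-join and
--     jumping straight past it; no running flag or accumulated phrase string.
--     Unlike the original, the stopword test for a self-contained tagged word
--     runs on the de-tagged word, not on the raw word including its markup.
--     """
--     words = text.split()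
--     n = len(words)
--     has_open = ['<phrase>' in w for w in words]
--     has_close = ['</phrase>' in w for w in words]
--     next_close = [0] * (n + 1)
--     next_close[n] = n
--     for k in range(n - 1, -1, -1):
--         next_close[k] = k if has_close[k] else next_close[k + 1]
--     pieces = []
--     i = 0
--     while i < n:
--         if has_open[i] and has_close[i]:
--             ph = words[i].replace('<phrase>', '').replace('</phrase>', '')
--             nxt = i + 1
--         elif has_open[i]:
--             j = next_close[i + 1]
--             if j == n:
--                 break  # unclosed phrase: nothing more is ever emitted
--             ph = '_'.join([words[i].replace('<phrase>', '')] +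
--                           [w.replace('</phrase>', '') for w in words[i + 1:j + 1]])
--             nxt = j + 1
--         else:
--             i += 1
--             continue
--         if not any(s in ph for s in phrase_stopwords):
--             pieces.append(ph)
--         i = nxt
--     return ''.join(p + ' ' for p in pieces)
-- ===== Notes on version B (the rewrite author's own statement) =====
-- stated objective: alternative
-- what changed: A's flag-driven state machine (phrase accumulated as a growing '_'-string across loop iterations, explicit stopword helper loop) is replaced by staged passes: per-word tag-flag lists and a suffix jump table of next-closing-tag indices are precomputed, then an index walk emits each phrase from a single slice-and-join of the word list and jumps straight past it; the redundant rstrip(' ') before split() is dropped.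
-- intended difference: On texts where a self-contained <phrase>...</phrase> token is met outside a phrase and its raw and de-tagged forms disagree about containing a stopword, A filters that phrase by the raw token (so a stopword like 'ras' matches the markup itself and the phrase is dropped), while B filters by the de-tagged word, the intended subject of the stopword test. — e.g. on merge_phrases("<phrase>cat</phrase>", ["ras"]): A returns "", B returns "cat "
import Mathlib
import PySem

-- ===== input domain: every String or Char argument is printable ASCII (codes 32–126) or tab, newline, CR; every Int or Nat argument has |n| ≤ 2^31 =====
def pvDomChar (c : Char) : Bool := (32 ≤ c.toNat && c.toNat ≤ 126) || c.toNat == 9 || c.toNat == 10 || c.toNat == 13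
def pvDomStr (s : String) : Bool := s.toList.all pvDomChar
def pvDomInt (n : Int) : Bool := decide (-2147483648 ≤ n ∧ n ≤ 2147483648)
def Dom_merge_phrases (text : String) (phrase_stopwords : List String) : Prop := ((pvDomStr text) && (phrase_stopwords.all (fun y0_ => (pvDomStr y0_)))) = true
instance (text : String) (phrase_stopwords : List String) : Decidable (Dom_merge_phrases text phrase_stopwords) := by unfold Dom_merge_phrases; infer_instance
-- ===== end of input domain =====

-- B replaces A's flag-driven state machine (phrase accumulated word by word) by a
-- staged computation: per-word tag flags, a suffix jump table of next-closing-tag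
-- indices, then an index walk emitting each phrase from one slice-and-join;
-- objective: alternative decomposition (same asymptotic cost). Intended
-- difference (D_ below): B runs the stopword test of a self-contained tagged
-- word on the de-tagged word, where A tests the raw word including its markup.

-- ===== PORT A =====
def pvOpenTag : List Char := ['<', 'p', 'h', 'r', 'a', 's', 'e', '>']
def pvCloseTag : List Char := ['<', '/', 'p', 'h', 'r', 'a', 's', 'e', '>']

-- check_phrasal_stopwords: loop returning True on first hit, else the (constant False) flag
def pvCheckStops (phrase : List Char) (stopwords_list : List (List Char)) : Bool :=
  match stopwords_list with
  | [] => false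
  | w :: rest => if PySem.Chars.isIn w phrase then true else pvCheckStops phrase rest

-- text.rstrip('\n') — ported by hand (exact: drops exactly the trailing '\n' characters)
def pvRstripNl (cs : List Char) : List Char := (cs.reverse.dropWhile (· == '\n')).reverse

-- one iteration of A's for-loop; state = (phrase_flag, new_line, phrase)
def pvStepA (sws : List (List Char)) (st : Bool × List Char × List Char) (word : List Char) :
    Bool × List Char × List Char :=
  if st.1 then
    let ph := st.2.2 ++ '_' :: PySem.Chars.replace word pvCloseTag []
    if PySem.Chars.isIn pvCloseTag word then
      if pvCheckStops ph sws then (false, st.2.1, ph)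
      else (false, st.2.1 ++ ph ++ [' '], ph)
    else (true, st.2.1, ph)
  else if PySem.Chars.isIn pvOpenTag word && PySem.Chars.isIn pvCloseTag word then
    if pvCheckStops word sws then st
    else (st.1, st.2.1 ++ PySem.Chars.replace (PySem.Chars.replace word pvOpenTag []) pvCloseTag [] ++ [' '], st.2.2)
  else if PySem.Chars.isIn pvOpenTag word then
    (true, st.2.1, PySem.Chars.replace word pvOpenTag [])
  else st

def merge_phrases (text : String) (phrase_stopwords : List String) : String :=
  String.ofList
    (((PySem.Chars.split₀ (pvRstripNl text.toList)).foldl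
      (pvStepA (phrase_stopwords.map String.toList)) (false, [], [])).2.1)

-- ===== PORT B =====
-- the reverse loop filling next_close: entry k is k if has_close[k] else entry k+1;
-- built back-to-front exactly as Python's downward loop writes it (entry n = n)
def pvBuildNC : List Bool → Nat → List Nat
  | [], off => [off]
  | b :: rest, off =>
    let tail := pvBuildNC rest (off + 1)
    (if b then off else tail.getD 0 0) :: tail

-- Source B's while loop over the word index; fuel only makes the recursion total
-- (each iteration advances i by at least 1, so fuel = n suffices)
def pvLoopB (sws words : List (List Char)) (ho hc : List Bool) (nc : List Nat) (n : Nat) :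
    Nat → Nat → List (List Char)
  | 0, _ => []
  | fuel + 1, i =>
    if i < n then
      if ho.getD i false && hc.getD i false then
        let ph := PySem.Chars.replace (PySem.Chars.replace (words.getD i []) pvOpenTag []) pvCloseTag []
        let rest := pvLoopB sws words ho hc nc n fuel (i + 1)
        if sws.any (fun s => PySem.Chars.isIn s ph) then rest else ph :: rest
      else if ho.getD i false then
        let j := nc.getD (i + 1) 0
        if j == n then []
        else
          let seg := PySem.List.slice words (some ((i : Int) + 1)) (some ((j : Int) + 1))
          let ph := PySem.Chars.join ['_']
            (PySem.Chars.replace (words.getD i []) pvOpenTag []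
              :: seg.map (fun w => PySem.Chars.replace w pvCloseTag []))
          let rest := pvLoopB sws words ho hc nc n fuel (j + 1)
          if sws.any (fun s => PySem.Chars.isIn s ph) then rest else ph :: rest
      else pvLoopB sws words ho hc nc n fuel (i + 1)
    else []

def merge_phrases_alt (text : String) (phrase_stopwords : List String) : String :=
  let sws := phrase_stopwords.map String.toList
  let words := PySem.Chars.split₀ text.toList
  let ho := words.map (fun w => PySem.Chars.isIn pvOpenTag w)
  let hc := words.map (fun w => PySem.Chars.isIn pvCloseTag w)
  let nc := pvBuildNC hc 0
  String.ofList
    (PySem.Chars.join []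
      ((pvLoopB sws words ho hc nc words.length words.length 0).map (· ++ [' '])))

-- ===== PRECONDITION & SPEC =====
-- the raw form and the de-tagged form of a token disagree about containing a stopword
def pvFlip (stops : List String) (tok : String) : Bool :=
  stops.any (fun sw => PySem.Str.isIn sw tok)
    != stops.any (fun sw => PySem.Str.isIn sw
        (PySem.Str.replace (PySem.Str.replace tok "<phrase>" "") "</phrase>" ""))

-- the change region: scanning the whitespace tokens of the text (pvScan outside a
-- tagged phrase, pvSkip inside one, until its closing tag), some self-contained
-- <phrase>…</phrase> token met outside a phrase is a pvFlip token
mutual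
def pvScan (stops : List String) : List String → Bool
  | [] => false
  | tok :: more =>
    if PySem.Str.isIn "<phrase>" tok && PySem.Str.isIn "</phrase>" tok then
      pvFlip stops tok || pvScan stops more
    else if PySem.Str.isIn "<phrase>" tok then pvSkip stops more
    else pvScan stops more
def pvSkip (stops : List String) : List String → Bool
  | [] => false
  | tok :: more =>
    if PySem.Str.isIn "</phrase>" tok then pvScan stops more else pvSkip stops more
end

-- On texts where a self-contained <phrase>…</phrase> token is met outside a phrase and
-- its raw and de-tagged forms disagree about containing a stopword, A filters that
-- phrase by the raw token (so a stopword can match the markup) and B filters by the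
-- de-tagged word, the intended subject of the stopword test.
def D_merge_phrases (text : String) (phrase_stopwords : List String) : Prop :=
  pvScan phrase_stopwords (PySem.Str.split₀ text) = true
instance (text : String) (phrase_stopwords : List String) : Decidable (D_merge_phrases text phrase_stopwords) := by unfold D_merge_phrases; infer_instance

def Spec_merge_phrases (text : String) (phrase_stopwords : List String) (out : String) : Prop := ¬ D_merge_phrases text phrase_stopwords → out = merge_phrases_alt text phrase_stopwords
instance (text : String) (phrase_stopwords : List String) (out : String) : Decidable (Spec_merge_phrases text phrase_stopwords out) := by unfold Spec_merge_phrases; infer_instance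

def pvDiffWitness_merge_phrases : String × List String := ("<phrase>cat</phrase>", ["ras"])
def pvDiffWitnessOut_merge_phrases : String × String := ("", "cat ")

-- ===== CLAIM (what is proved, stated in full; the proofs are below) =====
def Claim_unchanged_merge_phrases : Prop := ∀ (text : String) (phrase_stopwords : List String), Dom_merge_phrases text phrase_stopwords → Spec_merge_phrases text phrase_stopwords (merge_phrases text phrase_stopwords)
def Claim_changed_merge_phrases : Prop := Dom_merge_phrases (pvDiffWitness_merge_phrases.1) (pvDiffWitness_merge_phrases.2) ∧ D_merge_phrases (pvDiffWitness_merge_phrases.1) (pvDiffWitness_merge_phrases.2) ∧ merge_phrases (pvDiffWitness_merge_phrases.1) (pvDiffWitness_merge_phrases.2) = pvDiffWitnessOut_merge_phrases.1 ∧ merge_phrases_alt (pvDiffWitness_merge_phrases.1) (pvDiffWitness_merge_phrases.2) = pvDiffWitnessOut_merge_phrases.2 ∧ pvDiffWitnessOut_merge_phrases.1 ≠ pvDiffWitnessOut_merge_phrases.2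
def Claim_exact_merge_phrases : Prop := ∀ (text : String) (phrase_stopwords : List String), Dom_merge_phrases text phrase_stopwords → D_merge_phrases text phrase_stopwords → merge_phrases text phrase_stopwords ≠ merge_phrases_alt text phrase_stopwords

-- ===== LEMMAS AND PROOFS =====

-- proof-only rendering of A's segmentation as a recursion over the word LIST
-- (raw-word stopword test in the self-contained branch, as A does)
mutual
def pvGoA (sws : List (List Char)) : List (List Char) → List (List Char)
  | [] => []
  | w :: rest =>
    if PySem.Chars.isIn pvOpenTag w && PySem.Chars.isIn pvCloseTag w then
      if sws.any (fun s => PySem.Chars.isIn s w) then pvGoA sws rest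
      else PySem.Chars.replace (PySem.Chars.replace w pvOpenTag []) pvCloseTag [] :: pvGoA sws rest
    else if PySem.Chars.isIn pvOpenTag w then
      pvCollectA sws [PySem.Chars.replace w pvOpenTag []] rest
    else pvGoA sws rest
def pvCollectA (sws : List (List Char)) (parts : List (List Char)) : List (List Char) → List (List Char)
  | [] => []
  | w :: rest =>
    let parts' := parts ++ [PySem.Chars.replace w pvCloseTag []]
    if PySem.Chars.isIn pvCloseTag w then
      let ph := PySem.Chars.join ['_'] parts'
      if sws.any (fun s => PySem.Chars.isIn s ph) then pvGoA sws rest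
      else ph :: pvGoA sws rest
    else pvCollectA sws parts' rest
end

-- proof-only rendering of B's segmentation (de-tagged test in that branch)
mutual
def pvGoB (sws : List (List Char)) : List (List Char) → List (List Char)
  | [] => []
  | w :: rest =>
    if PySem.Chars.isIn pvOpenTag w && PySem.Chars.isIn pvCloseTag w then
      if sws.any (fun s => PySem.Chars.isIn s
          (PySem.Chars.replace (PySem.Chars.replace w pvOpenTag []) pvCloseTag [])) then pvGoB sws rest
      else PySem.Chars.replace (PySem.Chars.replace w pvOpenTag []) pvCloseTag [] :: pvGoB sws rest
    else if PySem.Chars.isIn pvOpenTag w then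
      pvCollectB sws [PySem.Chars.replace w pvOpenTag []] rest
    else pvGoB sws rest
def pvCollectB (sws : List (List Char)) (parts : List (List Char)) : List (List Char) → List (List Char)
  | [] => []
  | w :: rest =>
    let parts' := parts ++ [PySem.Chars.replace w pvCloseTag []]
    if PySem.Chars.isIn pvCloseTag w then
      let ph := PySem.Chars.join ['_'] parts'
      if sws.any (fun s => PySem.Chars.isIn s ph) then pvGoB sws rest
      else ph :: pvGoB sws rest
    else pvCollectB sws parts' rest
end

-- the change region, mirrored at the character level for the proofs
mutual
def pvScanC (sws : List (List Char)) : List (List Char) → Bool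
  | [] => false
  | w :: rest =>
    if PySem.Chars.isIn pvOpenTag w && PySem.Chars.isIn pvCloseTag w then
      ((sws.any (fun s => PySem.Chars.isIn s w))
        != sws.any (fun s => PySem.Chars.isIn s
            (PySem.Chars.replace (PySem.Chars.replace w pvOpenTag []) pvCloseTag [])))
        || pvScanC sws rest
    else if PySem.Chars.isIn pvOpenTag w then pvSkipC sws rest
    else pvScanC sws rest
def pvSkipC (sws : List (List Char)) : List (List Char) → Bool
  | [] => false
  | w :: rest =>
    if PySem.Chars.isIn pvCloseTag w then pvScanC sws rest else pvSkipC sws rest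
end

-- A's stopword loop is an any()
theorem pvCheckStops_eq (ph : List Char) (sws : List (List Char)) :
    pvCheckStops ph sws = sws.any (fun s => PySem.Chars.isIn s ph) := by
  induction sws with
  | nil => rfl
  | cons w rest ih =>
    by_cases h : PySem.Chars.isIn w ph = true
    · simp [pvCheckStops, h]
    · simp [pvCheckStops, h, ih]

-- split₀ ignores a whitespace-only suffix (so A's rstrip('\n') is invisible to it)
theorem pvSplitGo_ws (t : List Char) (cur : List Char) (acc : List (List Char))
    (h : t.all PySem.Chars.isspace) :
    PySem.Chars.split₀.go t cur acc = PySem.Chars.split₀.go [] cur acc := by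
  induction t generalizing cur acc with
  | nil => rfl
  | cons c rest ih =>
    simp only [List.all_cons, Bool.and_eq_true] at h
    conv_lhs => rw [PySem.Chars.split₀.go]
    simp only [h.1, if_true]
    by_cases hc : cur.isEmpty = true
    · rw [if_pos hc, ih _ _ h.2]
      conv_lhs => rw [PySem.Chars.split₀.go]
      conv_rhs => rw [PySem.Chars.split₀.go]
      simp [hc]
    · rw [if_neg hc, ih _ _ h.2]
      conv_lhs => rw [PySem.Chars.split₀.go]
      conv_rhs => rw [PySem.Chars.split₀.go]
      simp [hc]

theorem pvSplitGo_append_ws (s t : List Char) (cur : List Char) (acc : List (List Char))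
    (h : t.all PySem.Chars.isspace) :
    PySem.Chars.split₀.go (s ++ t) cur acc = PySem.Chars.split₀.go s cur acc := by
  induction s generalizing cur acc with
  | nil => simpa using pvSplitGo_ws t cur acc h
  | cons c rest ih =>
    rw [List.cons_append, PySem.Chars.split₀.go, PySem.Chars.split₀.go]
    split_ifs <;> simp [ih _ _]

theorem pvSplit_rstripNl (cs : List Char) :
    PySem.Chars.split₀ (pvRstripNl cs) = PySem.Chars.split₀ cs := by
  have hdecomp : cs = pvRstripNl cs ++ (cs.reverse.takeWhile (· == '\n')).reverse := by
    unfold pvRstripNl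
    conv_lhs => rw [← cs.reverse_reverse, ← List.takeWhile_append_dropWhile
      (p := (· == '\n')) (l := cs.reverse)]
    rw [List.reverse_append]
  have hws : ((cs.reverse.takeWhile (· == '\n')).reverse).all PySem.Chars.isspace := by
    simp only [List.all_reverse, List.all_eq_true]
    intro c hc
    have := List.mem_takeWhile_imp hc
    simp only [beq_iff_eq] at this
    subst this
    decide
  conv_rhs => rw [hdecomp]
  unfold PySem.Chars.split₀
  rw [pvSplitGo_append_ws _ _ _ _ hws]

-- join helpers
theorem pvJoin_nil_cons (x : List Char) (xs : List (List Char)) :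
    PySem.Chars.join [] (x :: xs) = x ++ PySem.Chars.join [] xs := by
  cases xs with
  | nil => simp [PySem.Chars.join, List.intercalate]
  | cons y rest => rw [PySem.Chars.join_cons_cons]; simp

theorem pvIntersperse_snoc {α : Type} (l : List α) (s x : α) (h : l ≠ []) :
    List.intersperse s (l ++ [x]) = List.intersperse s l ++ [s, x] := by
  induction l with
  | nil => exact absurd rfl h
  | cons a rest ih =>
    cases rest with
    | nil => simp
    | cons b r =>
      have ih' := ih (by simp)
      simp only [List.cons_append] at ih' ⊢
      rw [List.intersperse_cons₂, List.intersperse_cons₂, ih']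
      simp

theorem pvJoin_snoc (parts : List (List Char)) (x : List Char) (h : parts ≠ []) :
    PySem.Chars.join ['_'] (parts ++ [x]) = PySem.Chars.join ['_'] parts ++ '_' :: x := by
  simp only [PySem.Chars.join, List.intercalate, pvIntersperse_snoc parts ['_'] x h]
  simp

-- A's foldl equals the list rendering pvGoA / pvCollectA
mutual
theorem pvMainL1 (sws : List (List Char)) (ws : List (List Char)) (nl ph : List Char) :
    (ws.foldl (pvStepA sws) (false, nl, ph)).2.1
      = nl ++ PySem.Chars.join [] ((pvGoA sws ws).map (· ++ [' '])) := by
  cases ws with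
  | nil => simp [pvGoA, PySem.Chars.join_nil]
  | cons w rest =>
    rw [List.foldl_cons]
    by_cases hb : (PySem.Chars.isIn pvOpenTag w && PySem.Chars.isIn pvCloseTag w) = true
    · by_cases hs : (sws.any (fun s => PySem.Chars.isIn s w)) = true
      · have e : pvStepA sws (false, nl, ph) w = (false, nl, ph) := by
          simp [pvStepA, pvCheckStops_eq, hb, hs]
        rw [e, pvMainL1 sws rest nl ph]
        simp [pvGoA, hb, hs]
      · have e : pvStepA sws (false, nl, ph) w
            = (false, nl ++ PySem.Chars.replace (PySem.Chars.replace w pvOpenTag [])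
                pvCloseTag [] ++ [' '], ph) := by
          simp [pvStepA, pvCheckStops_eq, hb, hs]
        rw [e, pvMainL1 sws rest _ ph]
        simp [pvGoA, hb, hs, pvJoin_nil_cons]
    · by_cases ho : PySem.Chars.isIn pvOpenTag w = true
      · have hcw : PySem.Chars.isIn pvCloseTag w = false := by
          simp [ho] at hb; simpa using hb
        have e : pvStepA sws (false, nl, ph) w
            = (true, nl, PySem.Chars.replace w pvOpenTag []) := by
          simp [pvStepA, hcw, ho]
        rw [e, show PySem.Chars.replace w pvOpenTag []
            = PySem.Chars.join ['_'] [PySem.Chars.replace w pvOpenTag []] from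
            (PySem.Chars.join_singleton _ _).symm,
          pvMainL2 sws rest nl [PySem.Chars.replace w pvOpenTag []] (by simp)]
        simp [pvGoA, hcw, ho]
      · have e : pvStepA sws (false, nl, ph) w = (false, nl, ph) := by
          simp [pvStepA, ho]
        rw [e, pvMainL1 sws rest nl ph]
        simp [pvGoA, ho]
termination_by ws.length

theorem pvMainL2 (sws : List (List Char)) (ws : List (List Char)) (nl : List Char)
    (parts : List (List Char)) (hne : parts ≠ []) :
    (ws.foldl (pvStepA sws) (true, nl, PySem.Chars.join ['_'] parts)).2.1
      = nl ++ PySem.Chars.join [] ((pvCollectA sws parts ws).map (· ++ [' '])) := by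
  cases ws with
  | nil => simp [pvCollectA, PySem.Chars.join_nil]
  | cons w rest =>
    rw [List.foldl_cons]
    have hph : PySem.Chars.join ['_'] parts ++ '_' :: PySem.Chars.replace w pvCloseTag []
        = PySem.Chars.join ['_'] (parts ++ [PySem.Chars.replace w pvCloseTag []]) :=
      (pvJoin_snoc parts _ hne).symm
    by_cases hc : PySem.Chars.isIn pvCloseTag w = true
    · by_cases hs : (sws.any (fun s => PySem.Chars.isIn s
          (PySem.Chars.join ['_'] (parts ++ [PySem.Chars.replace w pvCloseTag []])))) = true
      · have e : pvStepA sws (true, nl, PySem.Chars.join ['_'] parts) w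
            = (false, nl, PySem.Chars.join ['_'] (parts ++ [PySem.Chars.replace w pvCloseTag []])) := by
          simp [pvStepA, pvCheckStops_eq, hc, hph, hs]
        rw [e, pvMainL1 sws rest nl _]
        simp [pvCollectA, hc, hs]
      · have e : pvStepA sws (true, nl, PySem.Chars.join ['_'] parts) w
            = (false, nl ++ PySem.Chars.join ['_'] (parts ++ [PySem.Chars.replace w pvCloseTag []]) ++ [' '],
               PySem.Chars.join ['_'] (parts ++ [PySem.Chars.replace w pvCloseTag []])) := by
          simp [pvStepA, pvCheckStops_eq, hc, hph, hs]
        rw [e, pvMainL1 sws rest _ _]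
        simp [pvCollectA, hc, hs, pvJoin_nil_cons]
    · have e : pvStepA sws (true, nl, PySem.Chars.join ['_'] parts) w
          = (true, nl, PySem.Chars.join ['_'] (parts ++ [PySem.Chars.replace w pvCloseTag []])) := by
        simp [pvStepA, hc, hph]
      rw [e, pvMainL2 sws rest nl _ (by simp)]
      simp [pvCollectA, hc]
termination_by ws.length
end

-- the jump table reads off first-occurrence indices
theorem pvNC_getD (hcl : List Bool) (off k : Nat) (hk : k ≤ hcl.length) :
    (pvBuildNC hcl off).getD k 0 = off + k + (hcl.drop k).findIdx (fun b => b) := by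
  induction hcl generalizing off k with
  | nil =>
    have : k = 0 := by simpa using hk
    subst this
    simp [pvBuildNC]
  | cons b rest ih =>
    cases k with
    | zero =>
      cases b with
      | true => simp [pvBuildNC, List.findIdx_cons]
      | false =>
        have h0 := ih (off + 1) 0 (Nat.zero_le _)
        simp only [List.drop_zero] at h0
        simp [pvBuildNC, List.findIdx_cons]
        simp at h0
        omega
    | succ k =>
      have h := ih (off + 1) k (by simpa using hk)
      simp only [pvBuildNC, List.getD_cons_succ, h, List.drop_succ_cons]
      omega

-- pvCollectB characterised by the first closing-tag index
theorem pvCollect_eq (sws : List (List Char)) (l parts : List (List Char)) :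
    pvCollectB sws parts l =
      (if l.findIdx (fun w => PySem.Chars.isIn pvCloseTag w) < l.length then
        (fun r =>
          (fun ph =>
            if sws.any (fun s => PySem.Chars.isIn s ph) then pvGoB sws (l.drop (r + 1))
            else ph :: pvGoB sws (l.drop (r + 1)))
          (PySem.Chars.join ['_']
            (parts ++ (l.take (r + 1)).map (fun w => PySem.Chars.replace w pvCloseTag []))))
        (l.findIdx (fun w => PySem.Chars.isIn pvCloseTag w))
      else []) := by
  induction l generalizing parts with
  | nil => simp [pvCollectB]
  | cons w rest ih =>
    by_cases hc : PySem.Chars.isIn pvCloseTag w = true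
    · simp [pvCollectB, hc, List.findIdx_cons]
    · have hc' : PySem.Chars.isIn pvCloseTag w = false := by simpa using hc
      rw [show pvCollectB sws parts (w :: rest)
          = pvCollectB sws (parts ++ [PySem.Chars.replace w pvCloseTag []]) rest by
            simp [pvCollectB, hc'],
        ih]
      simp only [List.findIdx_cons, hc', cond_false, List.length_cons,
        Nat.add_lt_add_iff_right, List.take_succ_cons, List.map_cons,
        List.drop_succ_cons, List.append_assoc, List.singleton_append]

-- B's index walk equals the list rendering
theorem pvLoop_eq (sws words : List (List Char)) :
    ∀ (fuel i : Nat), i ≤ words.length → words.length - i ≤ fuel →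
    pvLoopB sws words
      (words.map (fun w => PySem.Chars.isIn pvOpenTag w))
      (words.map (fun w => PySem.Chars.isIn pvCloseTag w))
      (pvBuildNC (words.map (fun w => PySem.Chars.isIn pvCloseTag w)) 0)
      words.length fuel i
      = pvGoB sws (words.drop i) := by
  intro fuel
  induction fuel with
  | zero =>
    intro i hi hf
    have : i = words.length := by omega
    subst this
    simp [pvLoopB, pvGoB]
  | succ fuel ih =>
    intro i hi hf
    by_cases hin : i < words.length
    · have hw : words.drop i = words[i] :: words.drop (i + 1) :=
        List.drop_eq_getElem_cons hin
      have hgetw : words.getD i [] = words[i] := List.getD_eq_getElem words [] hin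
      have hho : (words.map (fun w => PySem.Chars.isIn pvOpenTag w)).getD i false
          = PySem.Chars.isIn pvOpenTag words[i] := by
        rw [List.getD_eq_getElem _ _ (by simpa using hin)]; simp
      have hhc : (words.map (fun w => PySem.Chars.isIn pvCloseTag w)).getD i false
          = PySem.Chars.isIn pvCloseTag words[i] := by
        rw [List.getD_eq_getElem _ _ (by simpa using hin)]; simp
      rw [pvLoopB, if_pos hin, hho, hhc, hgetw]
      by_cases hb : (PySem.Chars.isIn pvOpenTag words[i]
          && PySem.Chars.isIn pvCloseTag words[i]) = true
      · rw [if_pos hb, ih (i + 1) (by omega) (by omega), hw]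
        rw [pvGoB, if_pos hb]
      · rw [if_neg hb]
        by_cases ho : PySem.Chars.isIn pvOpenTag words[i] = true
        · rw [if_pos ho]
          -- the jump-table read: j = i + 1 + first close index in the suffix
          have hr : ((words.map (fun w => PySem.Chars.isIn pvCloseTag w)).drop (i+1)).findIdx (fun b => b)
              = (words.drop (i+1)).findIdx (fun w => PySem.Chars.isIn pvCloseTag w) := by
            rw [← List.map_drop, List.findIdx_map]
            rfl
          have hj : (pvBuildNC (words.map (fun w => PySem.Chars.isIn pvCloseTag w)) 0).getD (i+1) 0
              = i + 1 + (words.drop (i+1)).findIdx (fun w => PySem.Chars.isIn pvCloseTag w) := by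
            rw [pvNC_getD _ 0 (i+1) (by simpa using hin), hr]
            omega
          set r := (words.drop (i+1)).findIdx (fun w => PySem.Chars.isIn pvCloseTag w) with hrdef
          have hrle : r ≤ (words.drop (i+1)).length := List.findIdx_le_length
          have hlen : (words.drop (i+1)).length = words.length - (i+1) := List.length_drop ..
          rw [hj]
          by_cases hend : i + 1 + r = words.length
          · -- j == n : unclosed phrase, both sides empty
            rw [if_pos (by simpa using hend)]
            have hnotlt : ¬ r < (words.drop (i+1)).length := by omega
            rw [hw, pvGoB, if_neg hb, if_pos ho, pvCollect_eq, if_neg hnotlt]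
          · rw [if_neg (by simpa using hend)]
            have hrlt : r < (words.drop (i+1)).length := by omega
            -- the slice words[i+1 : j+1]
            have hseg : PySem.List.slice words (some ((i : Int) + 1))
                (some (((i + 1 + r : Nat) : Int) + 1)) = (words.drop (i+1)).take (r+1) := by
              have : ((i : Int) + 1) = ((i + 1 : Nat) : Int) := by push_cast; ring
              rw [this, show (((i + 1 + r : Nat) : Int) + 1) = ((i + 1 + r + 1 : Nat) : Int) by
                push_cast; ring, PySem.List.slice_natCast]
              congr 1; omega
            rw [hseg, ih (i + 1 + r + 1) (by omega) (by omega)]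
            rw [hw, pvGoB, if_neg hb, if_pos ho, pvCollect_eq, if_pos hrlt, ← hrdef]
            have hdrop : words.drop (i + 1 + r + 1) = (words.drop (i+1)).drop (r+1) := by
              rw [List.drop_drop]; congr 1
            rw [hdrop]
            rfl
        · rw [if_neg ho, ih (i + 1) (by omega) (by omega), hw]
          rw [pvGoB, if_neg hb, if_neg ho]
    · rw [pvLoopB, if_neg hin]
      rw [List.drop_eq_nil_of_le (by omega)]
      rfl

-- toLists of the tag literals
theorem pvOpen_toList : "<phrase>".toList = pvOpenTag := by decide
theorem pvClose_toList : "</phrase>".toList = pvCloseTag := by decide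

-- the Str-level change region equals its character-level mirror
mutual
theorem pvScan_eq (stops : List String) (us : List String) :
    pvScan stops us = pvScanC (stops.map String.toList) (us.map String.toList) := by
  cases us with
  | nil => rfl
  | cons u more =>
    simp only [pvScan, pvFlip, List.map_cons, pvScanC, PySem.Str.isIn_eq,
      PySem.Str.toList_replace, pvOpen_toList, pvClose_toList,
      show "".toList = ([] : List Char) from rfl, List.any_map,
      pvScan_eq stops more, pvSkip_eq stops more]
    rfl
termination_by us.length
theorem pvSkip_eq (stops : List String) (us : List String) :
    pvSkip stops us = pvSkipC (stops.map String.toList) (us.map String.toList) := by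
  cases us with
  | nil => rfl
  | cons u more =>
    simp only [pvSkip, List.map_cons, pvSkipC, PySem.Str.isIn_eq, pvClose_toList,
      pvScan_eq stops more, pvSkip_eq stops more]
termination_by us.length
end

-- outside the change region the two renderings agree
mutual
theorem pvEQ_go (sws ws : List (List Char)) (h : pvScanC sws ws = false) :
    pvGoA sws ws = pvGoB sws ws := by
  cases ws with
  | nil => rfl
  | cons w rest =>
    by_cases hb : (PySem.Chars.isIn pvOpenTag w && PySem.Chars.isIn pvCloseTag w) = true
    · have h' := h
      simp only [pvScanC, hb, if_true, Bool.or_eq_false_iff, bne_eq_false_iff_eq] at h'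
      have hsame := h'.1
      have hrest := h'.2
      simp only [pvGoA, pvGoB, hb, if_true, hsame, pvEQ_go sws rest hrest]
    · by_cases ho : PySem.Chars.isIn pvOpenTag w = true
      · have hcw : PySem.Chars.isIn pvCloseTag w = false := by
          rcases Bool.eq_false_or_eq_true (PySem.Chars.isIn pvCloseTag w) with h0 | h0
          · exact absurd (by simp [ho, h0]) hb
          · exact h0
        have h' := h
        simp only [pvScanC, ho, hcw] at h'
        simp only [Bool.and_false, Bool.false_eq_true, if_false, if_true] at h'
        simp [pvGoA, pvGoB, ho, hcw, pvEQ_col sws rest h']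
      · have ho' : PySem.Chars.isIn pvOpenTag w = false := by simpa using ho
        have h' := h
        simp only [pvScanC, ho'] at h'
        simp only [Bool.false_and, Bool.false_eq_true, if_false] at h'
        simp [pvGoA, pvGoB, ho', pvEQ_go sws rest h']
termination_by ws.length
theorem pvEQ_col (sws ws : List (List Char)) (h : pvSkipC sws ws = false) :
    ∀ parts, pvCollectA sws parts ws = pvCollectB sws parts ws := by
  intro parts
  cases ws with
  | nil => rfl
  | cons w rest =>
    by_cases hc : PySem.Chars.isIn pvCloseTag w = true
    · have h' := h
      simp only [pvSkipC, hc, if_true] at h'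
      simp only [pvCollectA, pvCollectB, hc, if_true, pvEQ_go sws rest h']
    · have hc' : PySem.Chars.isIn pvCloseTag w = false := by simpa using hc
      have h' := h
      simp only [pvSkipC, hc'] at h'
      simp only [Bool.false_eq_true, if_false] at h'
      simp [pvCollectA, pvCollectB, hc', pvEQ_col sws rest h']
termination_by ws.length
end

-- every piece B emits passes the stopword test
mutual
theorem pvINV_go (sws ws : List (List Char)) (x : List Char) (hx : x ∈ pvGoB sws ws) :
    sws.any (fun s => PySem.Chars.isIn s x) = false := by
  cases ws with
  | nil => simp [pvGoB] at hx
  | cons w rest =>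
    by_cases hb : (PySem.Chars.isIn pvOpenTag w && PySem.Chars.isIn pvCloseTag w) = true
    · by_cases hs : (sws.any (fun s => PySem.Chars.isIn s
          (PySem.Chars.replace (PySem.Chars.replace w pvOpenTag []) pvCloseTag []))) = true
      · rw [pvGoB, if_pos hb, if_pos hs] at hx
        exact pvINV_go sws rest x hx
      · rw [pvGoB, if_pos hb, if_neg hs] at hx
        rcases List.mem_cons.mp hx with rfl | hx'
        · simpa using hs
        · exact pvINV_go sws rest x hx'
    · by_cases ho : PySem.Chars.isIn pvOpenTag w = true
      · rw [pvGoB, if_neg hb, if_pos ho] at hx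
        exact pvINV_col sws rest _ x hx
      · rw [pvGoB, if_neg hb, if_neg ho] at hx
        exact pvINV_go sws rest x hx
termination_by ws.length
theorem pvINV_col (sws ws parts : List (List Char)) (x : List Char)
    (hx : x ∈ pvCollectB sws parts ws) :
    sws.any (fun s => PySem.Chars.isIn s x) = false := by
  cases ws with
  | nil => simp [pvCollectB] at hx
  | cons w rest =>
    by_cases hc : PySem.Chars.isIn pvCloseTag w = true
    · by_cases hs : (sws.any (fun s => PySem.Chars.isIn s
          (PySem.Chars.join ['_'] (parts ++ [PySem.Chars.replace w pvCloseTag []])))) = true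
      · rw [pvCollectB, if_pos hc] at hx
        simp only [hs, if_true] at hx
        exact pvINV_go sws rest x hx
      · rw [pvCollectB, if_pos hc] at hx
        rw [if_neg hs] at hx
        rcases List.mem_cons.mp hx with rfl | hx'
        · simpa using hs
        · exact pvINV_go sws rest x hx'
    · rw [pvCollectB, if_neg hc] at hx
      exact pvINV_col sws rest _ x hx
termination_by ws.length
end

-- inside the change region the two renderings differ, even after any agreed prefix
mutual
theorem pvNEQ_go (sws ws ex : List (List Char))
    (hex : ∀ x ∈ ex, sws.any (fun s => PySem.Chars.isIn s x) = false)
    (hc : pvScanC sws ws = true ∨ ex ≠ []) :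
    pvGoA sws ws ≠ ex ++ pvGoB sws ws := by
  cases ws with
  | nil =>
    have hne : ex ≠ [] := by
      rcases hc with h | h
      · simp [pvScanC] at h
      · exact h
    simp only [pvGoA, pvGoB, List.append_nil]
    exact fun h => hne h.symm
  | cons w rest =>
    by_cases hb : (PySem.Chars.isIn pvOpenTag w && PySem.Chars.isIn pvCloseTag w) = true
    · set c := PySem.Chars.replace (PySem.Chars.replace w pvOpenTag []) pvCloseTag [] with hcdef
      by_cases hA : (sws.any (fun s => PySem.Chars.isIn s w)) = true
      · by_cases hB : (sws.any (fun s => PySem.Chars.isIn s c)) = true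
        · -- both drop: no flip here
          rw [pvGoA, if_pos hb, if_pos hA, pvGoB, if_pos hb, if_pos hB]
          refine pvNEQ_go sws rest ex hex ?_
          rcases hc with h | h
          · left
            simpa [pvScanC, hb, ← hcdef, hA, hB] using h
          · right; exact h
        · -- flip, A drops and B emits: the not-emitted c joins the prefix
          rw [pvGoA, if_pos hb, if_pos hA, pvGoB, if_pos hb, if_neg hB,
            show ex ++ c :: pvGoB sws rest = (ex ++ [c]) ++ pvGoB sws rest by simp]
          refine pvNEQ_go sws rest (ex ++ [c]) ?_ (Or.inr (by simp))
          intro x hx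
          rcases List.mem_append.mp hx with hx' | hx'
          · exact hex x hx'
          · simp only [List.mem_singleton] at hx'
            subst hx'
            simpa using hB
      · by_cases hB : (sws.any (fun s => PySem.Chars.isIn s c)) = true
        · -- flip, A emits and B drops: A's head fails B's invariant
          rw [pvGoA, if_pos hb, if_neg hA, pvGoB, if_pos hb, if_pos hB]
          intro h
          have hmem : c ∈ ex ++ pvGoB sws rest := by
            rw [← h]; exact List.mem_cons_self
          have : sws.any (fun s => PySem.Chars.isIn s c) = false := by
            rcases List.mem_append.mp hmem with hx' | hx'
            · exact hex c hx'
            · exact pvINV_go sws rest c hx'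
          simp [this] at hB
        · -- both emit the same piece
          rw [pvGoA, if_pos hb, if_neg hA, pvGoB, if_pos hb, if_neg hB]
          cases ex with
          | nil =>
            intro h
            simp only [List.nil_append, List.cons.injEq, true_and] at h
            refine pvNEQ_go sws rest [] (by simp) ?_ (by simpa using h)
            left
            rcases hc with h' | h'
            · simpa [pvScanC, hb, ← hcdef, hA, hB] using h'
            · simp at h'
          | cons e ex' =>
            intro h
            simp only [List.cons_append, List.cons.injEq] at h
            obtain ⟨rfl, h2⟩ := h
            refine pvNEQ_go sws rest (ex' ++ [c]) ?_ (Or.inr (by simp)) ?_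
            · intro x hx
              rcases List.mem_append.mp hx with hx' | hx'
              · exact hex x (List.mem_cons_of_mem _ hx')
              · simp only [List.mem_singleton] at hx'
                subst hx'
                simpa using hB
            · simpa [List.append_assoc] using h2
    · by_cases ho : PySem.Chars.isIn pvOpenTag w = true
      · have hcw2 : PySem.Chars.isIn pvCloseTag w = false := by
          rcases Bool.eq_false_or_eq_true (PySem.Chars.isIn pvCloseTag w) with h0 | h0
          · exact absurd (by simp [ho, h0]) hb
          · exact h0
        rw [pvGoA, if_neg hb, if_pos ho, pvGoB, if_neg hb, if_pos ho]
        refine pvNEQ_col sws rest _ ex hex ?_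
        rcases hc with h | h
        · left; simpa [pvScanC, ho, hcw2] using h
        · right; exact h
      · have ho' : PySem.Chars.isIn pvOpenTag w = false := by simpa using ho
        rw [pvGoA, if_neg hb, if_neg ho, pvGoB, if_neg hb, if_neg ho]
        refine pvNEQ_go sws rest ex hex ?_
        rcases hc with h | h
        · left; simpa [pvScanC, ho'] using h
        · right; exact h
termination_by ws.length
theorem pvNEQ_col (sws ws parts ex : List (List Char))
    (hex : ∀ x ∈ ex, sws.any (fun s => PySem.Chars.isIn s x) = false)
    (hc : pvSkipC sws ws = true ∨ ex ≠ []) :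
    pvCollectA sws parts ws ≠ ex ++ pvCollectB sws parts ws := by
  cases ws with
  | nil =>
    have hne : ex ≠ [] := by
      rcases hc with h | h
      · simp [pvSkipC] at h
      · exact h
    simp only [pvCollectA, pvCollectB, List.append_nil]
    exact fun h => hne h.symm
  | cons w rest =>
    by_cases hcw : PySem.Chars.isIn pvCloseTag w = true
    · set ph := PySem.Chars.join ['_'] (parts ++ [PySem.Chars.replace w pvCloseTag []]) with hphdef
      have hrest : pvScanC sws rest = true ∨ ex ≠ [] := by
        rcases hc with h | h
        · left
          rw [pvSkipC, if_pos hcw] at h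
          exact h
        · right; exact h
      by_cases hs : (sws.any (fun s => PySem.Chars.isIn s ph)) = true
      · rw [pvCollectA, if_pos hcw, pvCollectB, if_pos hcw]
        simp only [← hphdef]
        rw [if_pos hs, if_pos hs]
        exact pvNEQ_go sws rest ex hex hrest
      · rw [pvCollectA, if_pos hcw, pvCollectB, if_pos hcw]
        simp only [← hphdef]
        rw [if_neg hs, if_neg hs]
        cases ex with
        | nil =>
          intro h
          simp only [List.nil_append, List.cons.injEq, true_and] at h
          refine pvNEQ_go sws rest [] (by simp) ?_ (by simpa using h)
          rcases hrest with h' | h'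
          · exact Or.inl h'
          · simp at h'
        | cons e ex' =>
          intro h
          simp only [List.cons_append, List.cons.injEq] at h
          obtain ⟨he, h2⟩ := h
          subst he
          refine pvNEQ_go sws rest (ex' ++ [ph]) ?_ (Or.inr (by simp)) ?_
          · intro x hx
            rcases List.mem_append.mp hx with hx' | hx'
            · exact hex x (List.mem_cons_of_mem _ hx')
            · simp only [List.mem_singleton] at hx'
              subst hx'
              simpa using hs
          · simpa [List.append_assoc] using h2
    · rw [pvCollectA, if_neg hcw, pvCollectB, if_neg hcw]
      refine pvNEQ_col sws rest _ ex hex ?_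
      rcases hc with h | h
      · left; simpa [pvSkipC, hcw] using h
      · right; exact h
termination_by ws.length
end

-- characters of replace s old [] come from s
theorem pvReplaceGo_subset (old new : List Char) (fuel : Nat) (l acc : List Char) (x : Char)
    (hx : x ∈ PySem.Chars.replace.go old new fuel l acc) : x ∈ new ∨ x ∈ l ∨ x ∈ acc := by
  induction fuel generalizing l acc with
  | zero =>
    rw [PySem.Chars.replace.go] at hx
    rcases List.mem_append.mp hx with h | h
    · exact Or.inr (Or.inr (List.mem_reverse.mp h))
    · exact Or.inr (Or.inl h)
  | succ f ih =>
    cases l with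
    | nil =>
      rw [PySem.Chars.replace.go] at hx
      · exact Or.inr (Or.inr (List.mem_reverse.mp hx))
      · simp
    | cons c t =>
      rw [PySem.Chars.replace.go] at hx
      by_cases hp : old.isPrefixOf (c :: t) = true
      · rw [if_pos hp] at hx
        rcases ih _ _ hx with h | h | h
        · exact Or.inl h
        · exact Or.inr (Or.inl (List.mem_of_mem_drop h))
        · rcases List.mem_append.mp h with h' | h'
          · exact Or.inl (List.mem_reverse.mp h')
          · exact Or.inr (Or.inr h')
      · rw [if_neg hp] at hx
        rcases ih _ _ hx with h | h | h
        · exact Or.inl h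
        · exact Or.inr (Or.inl (List.mem_cons_of_mem _ h))
        · rcases List.mem_cons.mp h with h' | h'
          · exact Or.inr (Or.inl (h' ▸ List.mem_cons_self))
          · exact Or.inr (Or.inr h')

theorem pvMem_replace_nil (w old : List Char) (x : Char)
    (hx : x ∈ PySem.Chars.replace w old []) : x ∈ w := by
  unfold PySem.Chars.replace at hx
  by_cases he : old.isEmpty = true
  · rw [if_pos he] at hx
    simpa using hx
  · rw [if_neg he] at hx
    rcases pvReplaceGo_subset old [] w.length w [] x hx with h | h | h
    · simp at h
    · exact h
    · simp at h

-- split₀ produces whitespace-free tokens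
theorem pvSplitGo_nospace (s : List Char) (cur : List Char) (acc : List (List Char))
    (hcur : ∀ c ∈ cur, PySem.Chars.isspace c = false)
    (hacc : ∀ w ∈ acc, ∀ c ∈ w, PySem.Chars.isspace c = false) :
    ∀ w ∈ PySem.Chars.split₀.go s cur acc, ∀ c ∈ w, PySem.Chars.isspace c = false := by
  induction s generalizing cur acc with
  | nil =>
    intro w hw
    rw [PySem.Chars.split₀.go] at hw
    by_cases he : cur.isEmpty = true
    · rw [if_pos he] at hw
      exact hacc w (List.mem_reverse.mp hw)
    · rw [if_neg he] at hw
      rcases List.mem_cons.mp (List.mem_reverse.mp hw) with h | h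
      · subst h
        intro c hc
        exact hcur c (List.mem_reverse.mp hc)
      · exact hacc w h
  | cons a t ih =>
    intro w hw
    rw [PySem.Chars.split₀.go] at hw
    by_cases hsp : PySem.Chars.isspace a = true
    · rw [if_pos hsp] at hw
      by_cases he : cur.isEmpty = true
      · rw [if_pos he] at hw
        exact ih [] acc (by simp) hacc w hw
      · rw [if_neg he] at hw
        refine ih [] (cur.reverse :: acc) (by simp) ?_ w hw
        intro v hv
        rcases List.mem_cons.mp hv with h | h
        · subst h
          intro c hc
          exact hcur c (List.mem_reverse.mp hc)
        · exact hacc v h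
    · rw [if_neg hsp] at hw
      refine ih (a :: cur) acc ?_ hacc w hw
      intro c hc
      rcases List.mem_cons.mp hc with h | h
      · subst h; simpa using hsp
      · exact hcur c h

theorem pvSplit_nospace (cs : List Char) :
    ∀ w ∈ PySem.Chars.split₀ cs, ' ' ∉ w := by
  intro w hw hsp
  have := pvSplitGo_nospace cs [] [] (by simp) (by simp) w hw ' ' hsp
  simp [PySem.Chars.isspace] at this

-- membership in a '_' join
theorem pvMem_join_underscore (parts : List (List Char)) (x : Char)
    (hx : x ∈ PySem.Chars.join ['_'] parts) : x = '_' ∨ ∃ p ∈ parts, x ∈ p := by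
  induction parts with
  | nil => simp [PySem.Chars.join, List.intercalate] at hx
  | cons p rest ih =>
    cases rest with
    | nil =>
      rw [PySem.Chars.join_singleton] at hx
      exact Or.inr ⟨p, by simp, hx⟩
    | cons q r =>
      rw [PySem.Chars.join_cons_cons] at hx
      rcases List.mem_append.mp hx with h | h
      · rcases List.mem_append.mp h with h' | h'
        · exact Or.inr ⟨p, by simp, h'⟩
        · simp only [List.mem_singleton] at h'
          exact Or.inl h'
      · rcases ih h with h' | ⟨u, hu, hxu⟩
        · exact Or.inl h'
        · exact Or.inr ⟨u, List.mem_cons_of_mem _ hu, hxu⟩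

-- the rendered pieces are space-free (A and B alike)
mutual
theorem pvSF_goA (sws ws : List (List Char))
    (hws : ∀ w ∈ ws, ' ' ∉ w) :
    ∀ x ∈ pvGoA sws ws, ' ' ∉ x := by
  cases ws with
  | nil => simp [pvGoA]
  | cons w rest =>
    have hws' : ∀ v ∈ rest, ' ' ∉ v := fun v hv => hws v (List.mem_cons_of_mem _ hv)
    have hwsw : ' ' ∉ w := hws w List.mem_cons_self
    intro x hx
    by_cases hb : (PySem.Chars.isIn pvOpenTag w && PySem.Chars.isIn pvCloseTag w) = true
    · rw [pvGoA, if_pos hb] at hx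
      by_cases hs : (sws.any (fun s => PySem.Chars.isIn s w)) = true
      · rw [if_pos hs] at hx
        exact pvSF_goA sws rest hws' x hx
      · rw [if_neg hs] at hx
        rcases List.mem_cons.mp hx with rfl | hx'
        · intro hsp
          exact hwsw (pvMem_replace_nil _ _ _ (pvMem_replace_nil _ _ _ hsp))
        · exact pvSF_goA sws rest hws' x hx'
    · by_cases ho : PySem.Chars.isIn pvOpenTag w = true
      · rw [pvGoA, if_neg hb, if_pos ho] at hx
        refine pvSF_colA sws rest _ ?_ hws' x hx
        intro p hp
        simp only [List.mem_singleton] at hp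
        subst hp
        exact fun hsp => hwsw (pvMem_replace_nil _ _ _ hsp)
      · rw [pvGoA, if_neg hb, if_neg ho] at hx
        exact pvSF_goA sws rest hws' x hx
termination_by ws.length
theorem pvSF_colA (sws ws parts : List (List Char))
    (hparts : ∀ p ∈ parts, ' ' ∉ p)
    (hws : ∀ w ∈ ws, ' ' ∉ w) :
    ∀ x ∈ pvCollectA sws parts ws, ' ' ∉ x := by
  cases ws with
  | nil => simp [pvCollectA]
  | cons w rest =>
    have hws' : ∀ v ∈ rest, ' ' ∉ v := fun v hv => hws v (List.mem_cons_of_mem _ hv)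
    have hwsw : ' ' ∉ w := hws w List.mem_cons_self
    have hparts' : ∀ p ∈ parts ++ [PySem.Chars.replace w pvCloseTag []], ' ' ∉ p := by
      intro p hp
      rcases List.mem_append.mp hp with h | h
      · exact hparts p h
      · simp only [List.mem_singleton] at h
        subst h
        exact fun hsp => hwsw (pvMem_replace_nil _ _ _ hsp)
    have hph : ' ' ∉ PySem.Chars.join ['_'] (parts ++ [PySem.Chars.replace w pvCloseTag []]) := by
      intro hsp
      rcases pvMem_join_underscore _ _ hsp with h | ⟨p, hp, hxp⟩
      · simp at h
      · exact hparts' p hp hxp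
    intro x hx
    by_cases hc : PySem.Chars.isIn pvCloseTag w = true
    · rw [pvCollectA, if_pos hc] at hx
      by_cases hs : (sws.any (fun s => PySem.Chars.isIn s
          (PySem.Chars.join ['_'] (parts ++ [PySem.Chars.replace w pvCloseTag []])))) = true
      · simp only [if_pos hs] at hx
        exact pvSF_goA sws rest hws' x hx
      · simp only [if_neg hs] at hx
        rcases List.mem_cons.mp hx with rfl | hx'
        · exact hph
        · exact pvSF_goA sws rest hws' x hx'
    · rw [pvCollectA, if_neg hc] at hx
      exact pvSF_colA sws rest _ hparts' hws' x hx
termination_by ws.length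
end

mutual
theorem pvSF_goB (sws ws : List (List Char))
    (hws : ∀ w ∈ ws, ' ' ∉ w) :
    ∀ x ∈ pvGoB sws ws, ' ' ∉ x := by
  cases ws with
  | nil => simp [pvGoB]
  | cons w rest =>
    have hws' : ∀ v ∈ rest, ' ' ∉ v := fun v hv => hws v (List.mem_cons_of_mem _ hv)
    have hwsw : ' ' ∉ w := hws w List.mem_cons_self
    intro x hx
    by_cases hb : (PySem.Chars.isIn pvOpenTag w && PySem.Chars.isIn pvCloseTag w) = true
    · rw [pvGoB, if_pos hb] at hx
      by_cases hs : (sws.any (fun s => PySem.Chars.isIn s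
          (PySem.Chars.replace (PySem.Chars.replace w pvOpenTag []) pvCloseTag []))) = true
      · rw [if_pos hs] at hx
        exact pvSF_goB sws rest hws' x hx
      · rw [if_neg hs] at hx
        rcases List.mem_cons.mp hx with rfl | hx'
        · intro hsp
          exact hwsw (pvMem_replace_nil _ _ _ (pvMem_replace_nil _ _ _ hsp))
        · exact pvSF_goB sws rest hws' x hx'
    · by_cases ho : PySem.Chars.isIn pvOpenTag w = true
      · rw [pvGoB, if_neg hb, if_pos ho] at hx
        refine pvSF_colB sws rest _ ?_ hws' x hx
        intro p hp
        simp only [List.mem_singleton] at hp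
        subst hp
        exact fun hsp => hwsw (pvMem_replace_nil _ _ _ hsp)
      · rw [pvGoB, if_neg hb, if_neg ho] at hx
        exact pvSF_goB sws rest hws' x hx
termination_by ws.length
theorem pvSF_colB (sws ws parts : List (List Char))
    (hparts : ∀ p ∈ parts, ' ' ∉ p)
    (hws : ∀ w ∈ ws, ' ' ∉ w) :
    ∀ x ∈ pvCollectB sws parts ws, ' ' ∉ x := by
  cases ws with
  | nil => simp [pvCollectB]
  | cons w rest =>
    have hws' : ∀ v ∈ rest, ' ' ∉ v := fun v hv => hws v (List.mem_cons_of_mem _ hv)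
    have hwsw : ' ' ∉ w := hws w List.mem_cons_self
    have hparts' : ∀ p ∈ parts ++ [PySem.Chars.replace w pvCloseTag []], ' ' ∉ p := by
      intro p hp
      rcases List.mem_append.mp hp with h | h
      · exact hparts p h
      · simp only [List.mem_singleton] at h
        subst h
        exact fun hsp => hwsw (pvMem_replace_nil _ _ _ hsp)
    have hph : ' ' ∉ PySem.Chars.join ['_'] (parts ++ [PySem.Chars.replace w pvCloseTag []]) := by
      intro hsp
      rcases pvMem_join_underscore _ _ hsp with h | ⟨p, hp, hxp⟩
      · simp at h
      · exact hparts' p hp hxp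
    intro x hx
    by_cases hc : PySem.Chars.isIn pvCloseTag w = true
    · rw [pvCollectB, if_pos hc] at hx
      by_cases hs : (sws.any (fun s => PySem.Chars.isIn s
          (PySem.Chars.join ['_'] (parts ++ [PySem.Chars.replace w pvCloseTag []])))) = true
      · simp only [if_pos hs] at hx
        exact pvSF_goB sws rest hws' x hx
      · simp only [if_neg hs] at hx
        rcases List.mem_cons.mp hx with rfl | hx'
        · exact hph
        · exact pvSF_goB sws rest hws' x hx'
    · rw [pvCollectB, if_neg hc] at hx
      exact pvSF_colB sws rest _ hparts' hws' x hx
termination_by ws.length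
end

-- the trailing-space rendering is injective on space-free pieces
theorem pvEncSplit (x : List Char) : ∀ (y u v : List Char), ' ' ∉ x → ' ' ∉ y →
    x ++ ' ' :: u = y ++ ' ' :: v → x = y ∧ u = v := by
  induction x with
  | nil =>
    intro y u v _ hy h
    cases y with
    | nil => simpa using h
    | cons b y' =>
      simp only [List.nil_append, List.cons_append, List.cons.injEq] at h
      exact absurd (h.1 ▸ List.mem_cons_self) hy
  | cons a x' ih =>
    intro y u v hx hy h
    cases y with
    | nil =>
      simp only [List.cons_append, List.nil_append, List.cons.injEq] at h
      exact absurd (h.1 ▸ List.mem_cons_self) hx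
    | cons b y' =>
      simp only [List.cons_append, List.cons.injEq] at h
      obtain ⟨rfl, h2⟩ := h
      have := ih y' u v (fun hs => hx (List.mem_cons_of_mem _ hs))
        (fun hs => hy (List.mem_cons_of_mem _ hs)) h2
      exact ⟨by rw [this.1], this.2⟩

theorem pvEnc_inj (xs : List (List Char)) : ∀ (ys : List (List Char)),
    (∀ x ∈ xs, ' ' ∉ x) → (∀ y ∈ ys, ' ' ∉ y) →
    PySem.Chars.join [] (xs.map (· ++ [' '])) = PySem.Chars.join [] (ys.map (· ++ [' '])) →
    xs = ys := by
  induction xs with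
  | nil =>
    intro ys _ _ h
    cases ys with
    | nil => rfl
    | cons y t =>
      rw [List.map_cons, pvJoin_nil_cons] at h
      simp [PySem.Chars.join_nil] at h
  | cons x t ih =>
    intro ys hxs hys h
    cases ys with
    | nil =>
      rw [List.map_cons, pvJoin_nil_cons] at h
      simp [PySem.Chars.join_nil] at h
    | cons y s =>
      rw [List.map_cons, pvJoin_nil_cons, List.map_cons, pvJoin_nil_cons] at h
      simp only [List.append_assoc, List.singleton_append] at h
      obtain ⟨h1, h2⟩ := pvEncSplit x y _ _ (hxs x List.mem_cons_self)
        (hys y List.mem_cons_self) h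
      subst h1
      rw [ih s (fun v hv => hxs v (List.mem_cons_of_mem _ hv))
        (fun v hv => hys v (List.mem_cons_of_mem _ hv)) h2]

-- ===== VERDICT (by name: the statements are the Claim_ definitions above) =====
theorem merge_phrases_spec : Claim_unchanged_merge_phrases := by
  intro text stops _
  simp only [Spec_merge_phrases, merge_phrases, merge_phrases_alt]
  intro hnd
  have hsc : pvScanC (stops.map String.toList) (PySem.Chars.split₀ text.toList) = false := by
    have hb := pvScan_eq stops (PySem.Str.split₀ text)
    rw [PySem.Str.split₀_map_toList] at hb
    unfold D_merge_phrases at hnd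
    rw [hb] at hnd
    simpa using hnd
  rw [pvSplit_rstripNl, pvMainL1, pvLoop_eq _ _ _ 0 (Nat.zero_le _) (by omega),
    List.drop_zero, pvEQ_go _ _ hsc]
  simp

theorem merge_phrases_changed : Claim_changed_merge_phrases := by
  unfold Claim_changed_merge_phrases; decide

theorem merge_phrases_tight : Claim_exact_merge_phrases := by
  intro text stops _ hd
  have hsc : pvScanC (stops.map String.toList) (PySem.Chars.split₀ text.toList) = true := by
    have hb := pvScan_eq stops (PySem.Str.split₀ text)
    rw [PySem.Str.split₀_map_toList] at hb
    unfold D_merge_phrases at hd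
    rw [hb] at hd
    exact hd
  simp only [merge_phrases, merge_phrases_alt]
  rw [pvSplit_rstripNl, pvMainL1, pvLoop_eq _ _ _ 0 (Nat.zero_le _) (by omega),
    List.drop_zero]
  intro h
  have h2 : PySem.Chars.join []
        ((pvGoA (stops.map String.toList) (PySem.Chars.split₀ text.toList)).map (· ++ [' ']))
      = PySem.Chars.join []
        ((pvGoB (stops.map String.toList) (PySem.Chars.split₀ text.toList)).map (· ++ [' '])) := by
    have := congrArg String.toList h
    simpa using this
  have hEq := pvEnc_inj _ _
    (pvSF_goA (stops.map String.toList) _ (pvSplit_nospace text.toList))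
    (pvSF_goB (stops.map String.toList) _ (pvSplit_nospace text.toList)) h2
  exact pvNEQ_go (stops.map String.toList) (PySem.Chars.split₀ text.toList) []
    (by simp) (Or.inl hsc) (by simpa using hEq)
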